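-- pv_equiv track=rewrite | github.com/FAE-Sonata/AdventOfCode | 2022/day8.py | visible_col_wise
-- ===== SOURCE A (Python) =====
-- def visible_col_wise(grid, col_num):
--     num_cols = len(grid[0])
--     assert col_num >= 0 and col_num < num_cols
--     num_rows = len(grid)
--     if col_num == 0 or col_num == num_cols-1:
--         return [True] * num_rows
--     res = [False] * num_rows
--     res[0] = True; res[-1] = True
--     up_max = grid[0][col_num]; down_max = grid[-1][col_num]
--     for k in range(1, num_rows - 1):
--         up_height = grid[k][col_num]
--         down_idx = (num_rows - 1) - k
--         right_height = grid[down_idx][col_num]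
--         if up_height > up_max:
--             up_max = up_height
--             res[k] = True
--         if right_height > down_max:
--             down_max = right_height
--             res[down_idx] = True
--     return res
-- ===== SOURCE B (Python) =====
-- def visible_col_wise(grid, col_num):
--     num_cols = len(grid[0])
--     assert col_num >= 0 and col_num < num_cols
--     num_rows = len(grid)
--     if col_num == 0 or col_num == num_cols - 1:
--         return [True] * num_rows
--     heights = [row[col_num] for row in grid]
--     # per-cell specification check: a tree is visible iff it is on an edge row
--     # or strictly taller than everything above it or everything below it
--     return [k == 0 or k == num_rows - 1
--             or heights[k] > max(heights[:k])
--             or heights[k] > max(heights[k+1:])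
--             for k in range(num_rows)]
-- ===== Notes on version B (the rewrite author's own statement) =====
-- stated objective: alternative
-- what changed: A marks visibility with a single stateful loop maintaining two running maxima over mirrored indices; B has no accumulator at all: it extracts the column and decides each cell independently by comparing it against max() of the slice above and the slice below (a direct per-cell specification check, O(n^2) instead of O(n)).
import Mathlib
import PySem

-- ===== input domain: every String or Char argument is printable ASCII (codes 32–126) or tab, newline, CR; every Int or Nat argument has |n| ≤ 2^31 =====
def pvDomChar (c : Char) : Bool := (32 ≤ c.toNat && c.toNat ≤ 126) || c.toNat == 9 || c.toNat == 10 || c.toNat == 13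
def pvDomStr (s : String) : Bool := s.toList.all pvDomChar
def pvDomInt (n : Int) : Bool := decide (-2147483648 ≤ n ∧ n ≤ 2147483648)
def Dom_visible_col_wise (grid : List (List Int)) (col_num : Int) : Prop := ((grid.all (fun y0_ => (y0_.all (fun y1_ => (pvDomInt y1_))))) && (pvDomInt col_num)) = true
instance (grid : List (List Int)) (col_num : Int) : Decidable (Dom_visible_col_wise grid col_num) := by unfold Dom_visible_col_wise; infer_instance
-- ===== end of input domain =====

-- B replaces A's single stateful loop (two running maxima over mirrored indices) by a
-- stateless per-cell check: each cell is compared against max() of the slice above and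
-- the slice below it ("alternative"; O(n^2) instead of A's O(n)).

-- ===== PORT A =====
-- grid[k][col_num]; none = IndexError
def aGet (grid : List (List Int)) (col_num : Int) (k : Int) : Option Int :=
  (PySem.List.pyGet? grid k).bind (fun row => PySem.List.pyGet? row col_num)

-- one iteration of A's loop body; the Option state models a raised IndexError (ragged row)
def aStep (grid : List (List Int)) (col_num : Int) (nRows : Int)
    (st : Option (List Bool × Int × Int)) (k : Int) : Option (List Bool × Int × Int) :=
  st.bind (fun s =>
    (aGet grid col_num k).bind (fun up_height =>
      (aGet grid col_num ((nRows - 1) - k)).bind (fun right_height =>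
        let s1 := if up_height > s.2.1 then (s.1.set k.toNat true, up_height, s.2.2) else s
        some (if right_height > s1.2.2
              then (s1.1.set ((nRows - 1) - k).toNat true, s1.2.1, right_height)
              else s1))))

def visible_col_wise (grid : List (List Int)) (col_num : Int) : List Bool :=
  match PySem.List.pyGet? grid 0 with
  | none => []                                    -- grid[0] raises IndexError; excluded by Pre_
  | some row0 =>
    let num_cols : Int := row0.length
    if 0 ≤ col_num ∧ col_num < num_cols then
      let num_rows := grid.length
      if col_num = 0 ∨ col_num = num_cols - 1 then
        List.replicate num_rows true
      else
        -- res[0] = True; res[-1] = True (num_rows ≥ 1 here, so res[-1] is res[num_rows-1])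
        let res0 := ((List.replicate num_rows false).set 0 true).set (num_rows - 1) true
        match aGet grid col_num 0, aGet grid col_num (-1) with
        | some up0, some down0 =>
          match (PySem.List.pyRange 1 ((num_rows : Int) - 1) 1).foldl
              (aStep grid col_num (num_rows : Int)) (some (res0, up0, down0)) with
          | some s => s.1
          | none => []                            -- IndexError inside the loop; excluded by Pre_
        | _, _ => []                              -- IndexError on grid[0]/grid[-1][col]; excluded by Pre_
    else []                                       -- assert failure; excluded by Pre_

-- ===== PORT B =====
-- one comprehension cell: k == 0 or k == n-1 or heights[k] > max(heights[:k]) or heights[k] > max(heights[k+1:]).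
-- heights[:k] / heights[k+1:] with 0 ≤ k are exactly take k / drop (k+1) (PySem.List.slice_to_natCast /
-- slice_from_natCast); Python's max(xs) raises on empty xs — unreachable here since the 'or' chain
-- only evaluates it for 0 < k < n-1 (the 'none => false' branch is dead).
def bVis (hs : List Int) (n : Nat) (k : Nat) : Bool :=
  if k = 0 ∨ k = n - 1 then true
  else
    (match PySem.List.max? (hs.take k) (fun y => y) with
     | some m => decide (PySem.List.pyGetD hs (k : Int) 0 > m)
     | none => false) ||
    (match PySem.List.max? (hs.drop (k + 1)) (fun y => y) with
     | some m => decide (PySem.List.pyGetD hs (k : Int) 0 > m)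
     | none => false)

def visible_col_wise_alt (grid : List (List Int)) (col_num : Int) : List Bool :=
  match PySem.List.pyGet? grid 0 with
  | none => []                                    -- grid[0] raises IndexError; excluded by Pre_
  | some row0 =>
    let num_cols : Int := row0.length
    if 0 ≤ col_num ∧ col_num < num_cols then
      let num_rows := grid.length
      if col_num = 0 ∨ col_num = num_cols - 1 then
        List.replicate num_rows true
      else
        -- heights = [row[col_num] for row in grid]; none = IndexError on a ragged row
        match grid.mapM (fun row => PySem.List.pyGet? row col_num) with
        | none => []                              -- excluded by Pre_
        | some hs => (List.range num_rows).map (bVis hs num_rows)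
    else []                                       -- assert failure; excluded by Pre_

-- ===== PRECONDITION & SPEC =====
-- Pre_ = exactly the inputs where A returns: grid nonempty, 0 ≤ col_num < len(grid[0]) (the assert),
-- and, off the edge columns, every row long enough for grid[k][col_num].
def Pre_visible_col_wise (grid : List (List Int)) (col_num : Int) : Prop :=
  grid ≠ [] ∧ 0 ≤ col_num ∧ col_num < (grid.headI.length : Int) ∧
    (col_num = 0 ∨ col_num = (grid.headI.length : Int) - 1 ∨
      ∀ row ∈ grid, col_num < (row.length : Int))
instance (grid : List (List Int)) (col_num : Int) : Decidable (Pre_visible_col_wise grid col_num) := by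
  unfold Pre_visible_col_wise; infer_instance

def pvWitness_visible_col_wise : List (List Int) × Int := ([[3, 0, 3], [2, 5, 1], [6, 1, 2]], 1)

def Spec_visible_col_wise (grid : List (List Int)) (col_num : Int) (out : List Bool) : Prop :=
  out = visible_col_wise_alt grid col_num
instance (grid : List (List Int)) (col_num : Int) (out : List Bool) : Decidable (Spec_visible_col_wise grid col_num out) := by
  unfold Spec_visible_col_wise; infer_instance

-- ===== CLAIM (what is proved, stated in full; the proofs are below) =====
def Claim_equal_visible_col_wise : Prop :=
  ∀ (grid : List (List Int)) (col_num : Int), Dom_visible_col_wise grid col_num →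
    Pre_visible_col_wise grid col_num →
    Spec_visible_col_wise grid col_num (visible_col_wise grid col_num)

-- ===== LEMMAS AND PROOFS =====

-- a single running-max visibility update (used only to DESCRIBE A's loop in the proofs)
def bStep (hs : List Int) (st : List Bool × Int) (k : Int) : List Bool × Int :=
  if PySem.List.pyGetD hs k 0 > st.2 then (st.1.set k.toNat true, PySem.List.pyGetD hs k 0) else st

-- pure version of A's loop body, on the extracted column hs
def abStep (hs : List Int) (nRows : Int) (s : List Bool × Int × Int) (k : Int) : List Bool × Int × Int :=
  let b1 := bStep hs (s.1, s.2.1) k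
  let b2 := bStep hs (b1.1, s.2.2) ((nRows - 1) - k)
  (b2.1, b1.2, b2.2)

-- running max of hs[0..j]
def pmax (hs : List Int) : Nat → Int
  | 0 => hs.getD 0 0
  | j + 1 => max (pmax hs j) (hs.getD (j + 1) 0)

-- running max of hs[n-1-j..n-1] (from the bottom)
def smax (hs : List Int) (n : Nat) : Nat → Int
  | 0 => hs.getD (n - 1) 0
  | j + 1 => max (smax hs n j) (hs.getD (n - 1 - (j + 1)) 0)

-- result of A's forward marking after processing rows 1..j
def resUp (hs : List Int) : Nat → List Bool → List Bool
  | 0, res => res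
  | j + 1, res =>
    let R := resUp hs j res
    if hs.getD (j + 1) 0 > pmax hs j then R.set (j + 1) true else R

-- result of A's backward marking after processing rows n-2 down to n-1-j
def resDn (hs : List Int) (n : Nat) : Nat → List Bool → List Bool
  | 0, res => res
  | j + 1, res =>
    let R := resDn hs n j res
    if hs.getD (n - 2 - j) 0 > smax hs n j then R.set (n - 2 - j) true else R

theorem set_true_comm (xs : List Bool) (i j : Nat) :
    (xs.set i true).set j true = (xs.set j true).set i true := by
  by_cases h : i = j
  · subst h; simp [List.set_set]
  · exact List.set_comm true true h

theorem bFold_set (hs : List Int) (ks : List Int) (i : Nat) (res : List Bool) (m : Int) :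
    ks.foldl (bStep hs) (res.set i true, m) =
      ((ks.foldl (bStep hs) (res, m)).1.set i true, (ks.foldl (bStep hs) (res, m)).2) := by
  induction ks generalizing res m with
  | nil => simp
  | cons k ks ih =>
    simp only [List.foldl_cons, bStep]
    by_cases h : PySem.List.pyGetD hs k 0 > m
    · simp only [if_pos h]
      rw [set_true_comm, ih]
    · simp only [if_neg h]
      exact ih res m

theorem interleave (hs : List Int) (n : Int) (ks : List Int)
    (res : List Bool) (u d : Int) :
    ks.foldl (abStep hs n) (res, u, d) =
      (((ks.map (fun k => (n - 1) - k)).foldl (bStep hs) ((ks.foldl (bStep hs) (res, u)).1, d)).1,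
       (ks.foldl (bStep hs) (res, u)).2,
       ((ks.map (fun k => (n - 1) - k)).foldl (bStep hs) ((ks.foldl (bStep hs) (res, u)).1, d)).2) := by
  induction ks generalizing res u d with
  | nil => simp
  | cons k ks ih =>
    simp only [List.foldl_cons, List.map_cons]
    rw [ih]
    rcases hb : bStep hs (res, u) k with ⟨r1, u1⟩
    show _ = (((ks.map _).foldl _ ((bStep hs ((ks.foldl (bStep hs) (r1, u1)).1, d) ((n-1)-k)))).1, _, _)
    simp only [abStep, hb]
    by_cases h : PySem.List.pyGetD hs ((n - 1) - k) 0 > d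
    · simp only [bStep, if_pos h]
      rw [bFold_set]
    · simp only [bStep, if_neg h]

theorem mapM_pyGet_some (grid : List (List Int)) (col : Int)
    (h : ∀ row ∈ grid, 0 ≤ col ∧ col < (row.length : Int)) :
    ∃ hs : List Int, grid.mapM (fun row => PySem.List.pyGet? row col) = some hs ∧
      hs.length = grid.length ∧
      ∀ i : Nat, hs[i]? = (grid[i]?).bind (fun row => PySem.List.pyGet? row col) := by
  induction grid with
  | nil => exact ⟨[], by simp, by simp, by simp⟩
  | cons g gs ih =>
    obtain ⟨hs, hmap, hlen, hidx⟩ := ih (fun r hr => h r (List.mem_cons_of_mem _ hr))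
    obtain ⟨h0, h1⟩ := h g (List.mem_cons_self ..)
    have hg : PySem.List.pyGet? g col = some g[col.toNat] :=
      PySem.List.pyGet?_eq_some_getElem g h0 h1
    refine ⟨g[col.toNat] :: hs, ?_, by simp [hlen], ?_⟩
    · simp [List.mapM_cons, hg, hmap]
    · intro i
      cases i with
      | zero => simp [hg]
      | succ j => simpa using hidx j

theorem aGet_eq_pyGet (grid : List (List Int)) (col : Int) (hs : List Int)
    (hlen : hs.length = grid.length)
    (hidx : ∀ i : Nat, hs[i]? = (grid[i]?).bind (fun row => PySem.List.pyGet? row col)) :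
    ∀ k : Int, aGet grid col k = PySem.List.pyGet? hs k := by
  intro k
  unfold aGet
  by_cases hk : 0 ≤ k
  · rw [PySem.List.pyGet?_of_nonneg grid hk, PySem.List.pyGet?_of_nonneg hs hk, hidx]
  · have hm : k = -(((-k).toNat : Nat) : Int) := by omega
    have hmpos : 0 < (-k).toNat := by omega
    by_cases hle : (-k).toNat ≤ hs.length
    · rw [hm, PySem.List.pyGet?_neg_natCast grid _ hmpos (by omega),
          PySem.List.pyGet?_neg_natCast hs _ hmpos hle, hlen, hidx]
    · have h1 : PySem.List.pyGet? grid k = none := by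
        rw [PySem.List.pyGet?_eq_none_iff]
        simp only [PySem.Raise.InRange]
        omega
      have h2 : PySem.List.pyGet? hs k = none := by
        rw [PySem.List.pyGet?_eq_none_iff]
        simp only [PySem.Raise.InRange]
        omega
      rw [h1, h2]; rfl

theorem pyGet?_in_range (hs : List Int) (k : Int) (h0 : 0 ≤ k) (h1 : k < (hs.length : Int)) :
    PySem.List.pyGet? hs k = some (PySem.List.pyGetD hs k 0) := by
  rw [PySem.List.pyGet?_eq_some_getElem hs h0 h1, PySem.List.pyGetD_eq_getElem hs 0 h0 h1]

theorem optFold (grid : List (List Int)) (col n : Int) (hs : List Int)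
    (hget : ∀ k : Int, aGet grid col k = PySem.List.pyGet? hs k)
    (ks : List Int)
    (hmem : ∀ k ∈ ks, 0 ≤ k ∧ k < (hs.length : Int) ∧
      0 ≤ (n - 1) - k ∧ (n - 1) - k < (hs.length : Int)) :
    ∀ s : List Bool × Int × Int,
      ks.foldl (aStep grid col n) (some s) = some (ks.foldl (abStep hs n) s) := by
  induction ks with
  | nil => intro s; simp
  | cons k ks ih =>
    intro s
    obtain ⟨hk0, hk1, hd0, hd1⟩ := hmem k (List.mem_cons_self ..)
    have h1 : aGet grid col k = some (PySem.List.pyGetD hs k 0) := by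
      rw [hget, pyGet?_in_range hs k hk0 hk1]
    have h2 : aGet grid col ((n - 1) - k) = some (PySem.List.pyGetD hs ((n - 1) - k) 0) := by
      rw [hget, pyGet?_in_range hs _ hd0 hd1]
    simp only [List.foldl_cons]
    rw [show aStep grid col n (some s) k = some (abStep hs n s k) by
      simp only [aStep, h1, h2, Option.bind_some, abStep, bStep]
      by_cases c1 : PySem.List.pyGetD hs k 0 > s.2.1 <;>
        by_cases c2 : PySem.List.pyGetD hs ((n - 1) - k) 0 > s.2.2 <;>
        simp [c1, c2]]
    exact ih (fun x hx => hmem x (List.mem_cons_of_mem _ hx)) _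

-- lengths are preserved by the marking passes
theorem resUp_length (hs : List Int) (j : Nat) (res : List Bool) :
    (resUp hs j res).length = res.length := by
  induction j with
  | zero => rfl
  | succ j ih => simp only [resUp]; split <;> simp [ih]

theorem resDn_length (hs : List Int) (n : Nat) (j : Nat) (res : List Bool) :
    (resDn hs n j res).length = res.length := by
  induction j with
  | zero => rfl
  | succ j ih => simp only [resDn]; split <;> simp [ih]

-- A's forward fold over indices 1..j is resUp with running maximum pmax
theorem fwd_fold (hs : List Int) (j : Nat) (res : List Bool) :
    ((List.range j).map (fun i : Nat => (1 : Int) + i)).foldl (bStep hs) (res, pmax hs 0) =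
      (resUp hs j res, pmax hs j) := by
  induction j with
  | zero => simp [resUp]
  | succ j ih =>
    rw [List.range_succ, List.map_append, List.foldl_append, ih]
    simp only [List.map_cons, List.map_nil, List.foldl_cons, List.foldl_nil, bStep]
    have hc : ((1 : Int) + j) = ((j + 1 : Nat) : Int) := by omega
    rw [hc, PySem.List.pyGetD_natCast]
    by_cases h : hs.getD (j + 1) 0 > pmax hs j
    · simp only [if_pos h, resUp, pmax]
      have : max (pmax hs j) (hs.getD (j + 1) 0) = hs.getD (j + 1) 0 := by omega
      rw [this]
      congr 1
    · simp only [if_neg h, resUp, pmax]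
      have : max (pmax hs j) (hs.getD (j + 1) 0) = pmax hs j := by omega
      rw [this]

-- A's backward fold over indices n-2 down to n-1-j is resDn with running maximum smax
theorem bwd_fold (hs : List Int) (n : Nat) (j : Nat) (hj : j ≤ n - 2) (res : List Bool) :
    ((List.range j).map (fun i : Nat => ((n : Int) - 2) - i)).foldl (bStep hs) (res, smax hs n 0) =
      (resDn hs n j res, smax hs n j) := by
  induction j with
  | zero => simp [resDn]
  | succ j ih =>
    rw [List.range_succ, List.map_append, List.foldl_append, ih (by omega)]
    simp only [List.map_cons, List.map_nil, List.foldl_cons, List.foldl_nil, bStep]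
    have hc : ((n : Int) - 2 - j) = ((n - 2 - j : Nat) : Int) := by omega
    rw [hc, PySem.List.pyGetD_natCast]
    have hidx : n - 1 - (j + 1) = n - 2 - j := by omega
    by_cases h : hs.getD (n - 2 - j) 0 > smax hs n j
    · simp only [if_pos h, resDn, smax, hidx]
      have : max (smax hs n j) (hs.getD (n - 2 - j) 0) = hs.getD (n - 2 - j) 0 := by omega
      rw [this]
      congr 1
    · simp only [if_neg h, resDn, smax, hidx]
      have : max (smax hs n j) (hs.getD (n - 2 - j) 0) = smax hs n j := by omega
      rw [this]

theorem resUp_get (hs : List Int) (j : Nat) (res : List Bool) (hL : j < res.length) (i : Nat) :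
    (resUp hs j res)[i]? =
      if 1 ≤ i ∧ i ≤ j ∧ hs.getD i 0 > pmax hs (i - 1) then some true else res[i]? := by
  induction j with
  | zero =>
    simp only [resUp]
    rw [if_neg (by omega)]
  | succ j ih =>
    simp only [resUp]
    by_cases h : hs.getD (j + 1) 0 > pmax hs j
    · rw [if_pos h, List.getElem?_set]
      by_cases hi : j + 1 = i
      · subst hi
        rw [if_pos rfl, if_pos (by rw [resUp_length]; omega),
          if_pos ⟨by omega, by omega, by simpa using h⟩]
      · rw [if_neg hi, ih (by omega)]
        by_cases hc : 1 ≤ i ∧ i ≤ j ∧ hs.getD i 0 > pmax hs (i - 1)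
        · rw [if_pos hc, if_pos ⟨hc.1, by omega, hc.2.2⟩]
        · rw [if_neg hc, if_neg (fun hc2 => hc ⟨hc2.1, by omega, hc2.2.2⟩)]
    · rw [if_neg h, ih (by omega)]
      by_cases hc : 1 ≤ i ∧ i ≤ j ∧ hs.getD i 0 > pmax hs (i - 1)
      · rw [if_pos hc, if_pos ⟨hc.1, by omega, hc.2.2⟩]
      · rw [if_neg hc]
        by_cases hc2 : 1 ≤ i ∧ i ≤ j + 1 ∧ hs.getD i 0 > pmax hs (i - 1)
        · exfalso
          have hij : i = j + 1 := by omega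
          subst hij
          simp only [Nat.add_sub_cancel] at hc2
          exact h hc2.2.2
        · rw [if_neg hc2]

theorem resDn_get (hs : List Int) (n : Nat) (j : Nat) (hj : j ≤ n - 2)
    (res : List Bool) (hL : n ≤ res.length) (i : Nat) :
    (resDn hs n j res)[i]? =
      if n - 1 - j ≤ i ∧ i + 2 ≤ n ∧ hs.getD i 0 > smax hs n (n - 2 - i) then some true
      else res[i]? := by
  induction j with
  | zero =>
    simp only [resDn]
    rw [if_neg (by omega)]
  | succ j ih =>
    simp only [resDn]
    by_cases h : hs.getD (n - 2 - j) 0 > smax hs n j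
    · rw [if_pos h, List.getElem?_set]
      by_cases hi : n - 2 - j = i
      · subst hi
        have hji : n - 2 - (n - 2 - j) = j := by omega
        rw [if_pos rfl, if_pos (by rw [resDn_length]; omega),
          if_pos ⟨by omega, by omega, by rw [hji]; exact h⟩]
      · rw [if_neg hi, ih (by omega)]
        by_cases hc : n - 1 - j ≤ i ∧ i + 2 ≤ n ∧ hs.getD i 0 > smax hs n (n - 2 - i)
        · rw [if_pos hc, if_pos ⟨by omega, hc.2.1, hc.2.2⟩]
        · rw [if_neg hc, if_neg (fun hc2 => hc ⟨by omega, hc2.2.1, hc2.2.2⟩)]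
    · rw [if_neg h, ih (by omega)]
      by_cases hc : n - 1 - j ≤ i ∧ i + 2 ≤ n ∧ hs.getD i 0 > smax hs n (n - 2 - i)
      · rw [if_pos hc, if_pos ⟨by omega, hc.2.1, hc.2.2⟩]
      · rw [if_neg hc]
        by_cases hc2 : n - 1 - (j + 1) ≤ i ∧ i + 2 ≤ n ∧ hs.getD i 0 > smax hs n (n - 2 - i)
        · exfalso
          have hij : i = n - 2 - j := by omega
          subst hij
          have hji : n - 2 - (n - 2 - j) = j := by omega
          rw [hji] at hc2
          exact h hc2.2.2
        · rw [if_neg hc2]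

theorem foldl_max_init (t : List Int) (x y : Int) :
    t.foldl max (max x y) = max x (t.foldl max y) := by
  induction t generalizing y with
  | nil => simp
  | cons a t ih =>
    simp only [List.foldl_cons]
    rw [max_assoc, ih]

-- Python's max(heights[:j+1]) is the running maximum pmax hs j
theorem max_take (hs : List Int) (j : Nat) (hj : j < hs.length) :
    PySem.List.max? (hs.take (j + 1)) (fun y => y) = some (pmax hs j) := by
  induction j with
  | zero =>
    match hs, hj with
    | x :: t, _ => simp [PySem.List.max?_id_cons, pmax]
  | succ j ih =>
    have hjlt : j < hs.length := by omega
    have htake : hs.take (j + 2) = hs.take (j + 1) ++ [hs[j + 1]] := by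
      rw [List.take_add_one, List.getElem?_eq_getElem hj]
      rfl
    match h : hs.take (j + 1), ih hjlt with
    | x :: t, ihv =>
      rw [htake, h]
      simp only [List.cons_append, PySem.List.max?_id_cons] at ihv ⊢
      rw [List.foldl_append]
      simp only [List.foldl_cons, List.foldl_nil]
      have hv : t.foldl max x = pmax hs j := by simpa using ihv
      rw [hv, pmax]
      congr 1
      rw [List.getD_eq_getElem hs 0 hj]

-- Python's max(heights[k+1:]) is the running maximum smax from the bottom
theorem max_drop (hs : List Int) (n : Nat) (hn : n = hs.length) (d : Nat) :
    d + 1 ≤ n → PySem.List.max? (hs.drop (n - 1 - d)) (fun y => y) = some (smax hs n d) := by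
  induction d with
  | zero =>
    intro hd
    simp only [Nat.sub_zero]
    have hlt : n - 1 < hs.length := by omega
    have : hs.drop (n - 1) = [hs[n - 1]] := by
      rw [List.drop_eq_getElem_cons hlt, List.drop_eq_nil_of_le (by omega)]
    rw [this]
    simp [PySem.List.max?_id_cons, smax, List.getElem?_eq_getElem hlt]
  | succ d ih =>
    intro hd
    have hlt : n - 1 - (d + 1) < hs.length := by omega
    have hstep : hs.drop (n - 1 - (d + 1)) = hs[n - 1 - (d + 1)] :: hs.drop (n - 1 - d) := by
      have hidx2 : n - 1 - (d + 1) + 1 = n - 1 - d := by omega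
      rw [List.drop_eq_getElem_cons hlt, hidx2]
    have ihv0 := ih (by omega)
    match h : hs.drop (n - 1 - d), ihv0 with
    | x :: t, ihv =>
      rw [hstep, h]
      simp only [PySem.List.max?_id_cons] at ihv ⊢
      simp only [List.foldl_cons]
      have hv : t.foldl max x = smax hs n d := by simpa using ihv
      rw [foldl_max_init, hv, smax, max_comm]
      congr 1
      rw [List.getD_eq_getElem hs 0 hlt]

-- res0[i]? : true exactly at the two edges
theorem res0_get (n : Nat) (hn : 1 ≤ n) (i : Nat) (hi : i < n) :
    (((List.replicate n false).set 0 true).set (n - 1) true)[i]? =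
      some (decide (i = 0 ∨ i = n - 1)) := by
  rw [List.getElem?_set, List.getElem?_set]
  simp only [List.length_set, List.length_replicate, List.getElem?_replicate]
  by_cases h1 : n - 1 = i
  · rw [if_pos h1, if_pos (by omega)]
    simp [h1]
  · rw [if_neg h1]
    by_cases h0 : 0 = i
    · rw [if_pos h0, if_pos (by omega)]
      simp [← h0]
    · rw [if_neg h0, if_pos hi]
      have hne : ¬ (i = 0 ∨ i = n - 1) := by omega
      simp [hne]

-- the two passes over the column produce exactly B's per-cell checks
theorem twoPass_eq_map (hs : List Int) (n : Nat) (hn : n = hs.length) (hn1 : 1 ≤ n) :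
    (resDn hs n (n - 2) (resUp hs (n - 2)
        (((List.replicate n false).set 0 true).set (n - 1) true))) =
      (List.range n).map (bVis hs n) := by
  have hL0 : (((List.replicate n false).set 0 true).set (n - 1) true).length = n := by simp
  apply List.ext_getElem?
  intro i
  by_cases hi : i < n
  · rw [resDn_get hs n (n - 2) le_rfl _ (by rw [resUp_length, hL0]) i,
      resUp_get hs (n - 2) _ (by rw [hL0]; omega) i, res0_get n hn1 i hi,
      List.getElem?_map, List.getElem?_range hi]
    simp only [Option.map_some]
    by_cases hedge : i = 0 ∨ i = n - 1
    · rw [if_neg (by rcases hedge with h | h <;> omega),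
        if_neg (by rcases hedge with h | h <;> omega)]
      simp [bVis, hedge]
    · have hup : PySem.List.max? (hs.take i) (fun y => y) = some (pmax hs (i - 1)) := by
        have hmt := max_take hs (i - 1) (by omega)
        rw [show (i - 1) + 1 = i by omega] at hmt
        exact hmt
      have hdn : PySem.List.max? (hs.drop (i + 1)) (fun y => y) =
          some (smax hs n (n - 2 - i)) := by
        have hmd := max_drop hs n hn (n - 2 - i) (by omega)
        rw [show n - 1 - (n - 2 - i) = i + 1 by omega] at hmd
        exact hmd
      have hb : bVis hs n i =
          (decide (hs.getD i 0 > pmax hs (i - 1)) ||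
           decide (hs.getD i 0 > smax hs n (n - 2 - i))) := by
        simp only [bVis, if_neg hedge, hup, hdn]
        rw [PySem.List.pyGetD_natCast]
      rw [hb]
      by_cases c1 : hs.getD i 0 > smax hs n (n - 2 - i)
      · rw [if_pos ⟨by omega, by omega, c1⟩]
        simp
        exact Or.inr c1
      · rw [if_neg (fun h => c1 h.2.2)]
        by_cases c2 : hs.getD i 0 > pmax hs (i - 1)
        · rw [if_pos ⟨by omega, by omega, c2⟩]
          simp
          exact Or.inl c2
        · rw [if_neg (fun h => c2 h.2.2)]
          simp [hedge]
          exact ⟨not_lt.mp c2, not_lt.mp c1⟩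
  · rw [List.getElem?_eq_none (by rw [resDn_length, resUp_length, hL0]; omega),
      List.getElem?_eq_none (by simp; omega)]

theorem main_equiv (grid : List (List Int)) (col_num : Int)
    (hpre : Pre_visible_col_wise grid col_num) :
    visible_col_wise grid col_num = visible_col_wise_alt grid col_num := by
  obtain ⟨hne, h0, hlt, hcase⟩ := hpre
  match grid, hne with
  | g :: gs, _ =>
    simp only [List.headI] at hlt hcase
    by_cases hedge : col_num = 0 ∨ col_num = ((g.length : Nat) : Int) - 1
    · simp only [visible_col_wise, visible_col_wise_alt, PySem.List.pyGet?_zero_cons,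
        if_pos (⟨h0, hlt⟩ : 0 ≤ col_num ∧ col_num < ((g.length : Nat) : Int)), if_pos hedge]
    · have hrow : ∀ row ∈ g :: gs, 0 ≤ col_num ∧ col_num < (row.length : Int) := by
        rcases hcase with h | h | h
        · exact absurd (Or.inl h) hedge
        · exact absurd (Or.inr h) hedge
        · exact fun r hr => ⟨h0, h r hr⟩
      obtain ⟨hs, hmap, hlen, hidx⟩ := mapM_pyGet_some (g :: gs) col_num hrow
      have hget := aGet_eq_pyGet (g :: gs) col_num hs hlen hidx
      have hlen' : hs.length = gs.length + 1 := by simpa using hlen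
      have hne' : hs ≠ [] := by intro h; simp [h] at hlen'
      set n : Nat := (g :: gs).length with hn
      have hnlen : n = hs.length := by simp [hn, hlen']
      have hn1 : 1 ≤ n := by simp [hn]
      have hu0 : aGet (g :: gs) col_num 0 = some (PySem.List.pyGetD hs 0 0) := by
        rw [hget 0]; exact pyGet?_in_range hs 0 le_rfl (by omega)
      have hd0 : aGet (g :: gs) col_num (-1) = some (PySem.List.pyGetD hs (-1) 0) := by
        rw [hget (-1), PySem.List.pyGet?_neg_one, PySem.List.pyGetD_neg_one hs 0 hne',
          List.getLast?_eq_some_getLast hne']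
      have hmem : ∀ k ∈ PySem.List.pyRange 1 ((n : Int) - 1) 1,
          0 ≤ k ∧ k < (hs.length : Int) ∧ 0 ≤ ((n : Int) - 1) - k ∧
            ((n : Int) - 1) - k < (hs.length : Int) := by
        intro k hk
        rw [PySem.List.mem_pyRange_one] at hk
        omega
      have hopt := optFold (g :: gs) col_num (n : Int) hs hget _ hmem
      have hfwd0 : PySem.List.pyGetD hs 0 0 = pmax hs 0 := by
        simp only [pmax]
        exact PySem.List.pyGetD_natCast hs 0 0
      have hbwd0 : PySem.List.pyGetD hs (-1) 0 = smax hs n 0 := by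
        rw [PySem.List.pyGetD_neg_one hs 0 hne', smax,
          List.getLast_eq_getElem, List.getD_eq_getElem hs 0 (by omega)]
        congr 1
        omega
      have hr1 : PySem.List.pyRange 1 ((n : Int) - 1) 1 =
          (List.range (n - 2)).map (fun i : Nat => (1 : Int) + i) := by
        have hc2 : ((n : Int) - 1 - 1).toNat = n - 2 := by omega
        rw [PySem.List.pyRange_one, hc2]
      have hr2 : (PySem.List.pyRange 1 ((n : Int) - 1) 1).map (fun k => ((n : Int) - 1) - k) =
          (List.range (n - 2)).map (fun i : Nat => ((n : Int) - 2) - i) := by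
        rw [hr1, List.map_map]
        apply List.map_congr_left
        intro k _
        simp only [Function.comp]
        ring
      simp only [visible_col_wise, visible_col_wise_alt, PySem.List.pyGet?_zero_cons,
        if_pos (⟨h0, hlt⟩ : 0 ≤ col_num ∧ col_num < ((g.length : Nat) : Int)), if_neg hedge,
        hu0, hd0, hmap, ← hn, hopt, interleave, hr2]
      rw [hr1]
      rw [hfwd0, fwd_fold hs (n - 2), hbwd0, bwd_fold hs n (n - 2) le_rfl]
      exact twoPass_eq_map hs n hnlen hn1

-- ===== VERDICT (by name: the statement is the Claim_ definition above) =====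
theorem visible_col_wise_spec : Claim_equal_visible_col_wise := by
  intro grid col_num _ hpre
  unfold Spec_visible_col_wise
  exact main_equiv grid col_num hpre
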